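-- pv_equiv track=rewrite | github.com/scilus/scilpy | scilpy/utils/scilpy_bot.py | _split_first_sentence
-- ===== SOURCE A (Python) =====
-- def _split_first_sentence(text):
--     """
--     Split the first sentence from the rest of a string by finding the first
--     dot or newline. If there is no dot or newline, return the full string as
--     the first sentence, and None as the remaining text.
--
--     Parameters
--     ----------
--     text : str
--         Text to parse.
--
--     Returns
--     -------
--     first_sentence : str
--         The first sentence, or the full text if no dot or newline was found.
--     remaining : str
--         Everything after the first sentence.
--
--     """
--     candidates = ['. ', '.\n']
--     sentence_idx = -1
--     for candidate in candidates:
--         idx = text.find(candidate)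
--         if idx != -1 and idx < sentence_idx or sentence_idx == -1:
--             sentence_idx = idx
--
--     split_idx = (sentence_idx + 1) or None
--     sentence = text[:split_idx]
--     remaining = text[split_idx:] if split_idx else ""
--     return sentence, remaining
-- ===== SOURCE B (Python) =====
-- import re
--
-- def _split_first_sentence(text):
--     m = re.search(r'\.[ \n]', text)
--     if m is None:
--         return text, ""
--     i = m.start() + 1
--     return text[:i], text[i:]
-- ===== Notes on version B (the rewrite author's own statement) =====
-- stated objective: idiomatic
-- what changed: Replaces A's two separate str.find scans plus the min-folding loop over a candidate list with a single regex search for a dot followed by a space or newline, splitting directly after the first match.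
import Mathlib
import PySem

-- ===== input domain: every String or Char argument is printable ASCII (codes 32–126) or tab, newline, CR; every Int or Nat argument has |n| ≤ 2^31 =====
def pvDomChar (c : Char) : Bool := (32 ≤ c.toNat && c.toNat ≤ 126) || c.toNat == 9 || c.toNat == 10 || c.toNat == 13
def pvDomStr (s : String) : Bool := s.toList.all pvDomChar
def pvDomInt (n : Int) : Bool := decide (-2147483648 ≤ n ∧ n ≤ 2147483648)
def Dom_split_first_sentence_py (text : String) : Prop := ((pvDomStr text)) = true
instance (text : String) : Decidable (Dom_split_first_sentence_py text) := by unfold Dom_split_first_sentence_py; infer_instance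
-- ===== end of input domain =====

-- B replaces A's two str.find scans and min-folding loop by a single regex-style scan (idiomatic; no speed claim).

-- ===== PORT A =====
-- literal transliteration of A: candidate list, min-folding loop, then the `(sentence_idx+1) or None` split
def split_first_sentence_py (text : String) : String × String :=
  let candidates : List String := [". ", ".\n"]
  let sentence_idx : Int := candidates.foldl (fun sentence_idx candidate =>
    let idx := PySem.Str.find text candidate
    if (idx ≠ -1 ∧ idx < sentence_idx) ∨ sentence_idx = -1 then idx else sentence_idx) (-1)
  -- split_idx = (sentence_idx + 1) or None : falsy (0) means None → whole text, remaining ""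
  if sentence_idx + 1 = 0 then (text, "")
  else (String.mk (PySem.List.slice text.toList none (some (sentence_idx + 1))),
        String.mk (PySem.List.slice text.toList (some (sentence_idx + 1)) none))

-- ===== PORT B =====
-- re.search(r'\.[ \n]', text): left-to-right scan returning the index of the first match
def pvRegexDot : List Char → Option Nat
  | [] => none
  | c :: rest =>
      if c = '.' ∧ (rest.head? = some ' ' ∨ rest.head? = some '\n')
      then some 0
      else (pvRegexDot rest).map (· + 1)

def split_first_sentence_py_alt (text : String) : String × String :=
  match pvRegexDot text.toList with
  | none => (text, "")
  | some j =>
      let i := j + 1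
      (String.mk (text.toList.take i), String.mk (text.toList.drop i))

-- ===== PRECONDITION & SPEC =====
def Spec_split_first_sentence_py (text : String) (out : String × String) : Prop := out = split_first_sentence_py_alt text
instance (text : String) (out : String × String) : Decidable (Spec_split_first_sentence_py text out) := by unfold Spec_split_first_sentence_py; infer_instance

-- ===== CLAIM (what is proved, stated in full; the proofs are below) =====
def Claim_equal_split_first_sentence_py : Prop := ∀ (text : String), Dom_split_first_sentence_py text → Spec_split_first_sentence_py text (split_first_sentence_py text)

-- ===== LEMMAS AND PROOFS =====

-- "a sentence boundary pattern starts at position j of l"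
def pvP (l : List Char) (j : Nat) : Prop :=
  ['.', ' '] <+: l.drop j ∨ ['.', '\n'] <+: l.drop j

theorem pvP_zero_iff (c : Char) (rest : List Char) :
    pvP (c :: rest) 0 ↔ (c = '.' ∧ (rest.head? = some ' ' ∨ rest.head? = some '\n')) := by
  unfold pvP
  cases rest with
  | nil => simp [List.cons_prefix_cons]
  | cons d t => simp [List.prefix_cons_iff]; tauto

theorem pvP_succ_iff (c : Char) (rest : List Char) (j : Nat) :
    pvP (c :: rest) (j + 1) ↔ pvP rest j := by
  unfold pvP; simp

theorem pvRegexDot_none (l : List Char) (h : pvRegexDot l = none) : ∀ j, ¬ pvP l j := by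
  induction l with
  | nil => intro j; unfold pvP; simp
  | cons c rest ih =>
    unfold pvRegexDot at h
    split_ifs at h with hc
    simp only [Option.map_eq_none_iff] at h
    intro j
    cases j with
    | zero => rw [pvP_zero_iff]; exact hc
    | succ j => rw [pvP_succ_iff]; exact ih h j

theorem pvRegexDot_some (l : List Char) (j : Nat) (h : pvRegexDot l = some j) :
    pvP l j ∧ ∀ i, i < j → ¬ pvP l i := by
  induction l generalizing j with
  | nil => simp [pvRegexDot] at h
  | cons c rest ih =>
    unfold pvRegexDot at h
    split_ifs at h with hc
    · simp at h
      subst h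
      exact ⟨(pvP_zero_iff c rest).mpr hc, by omega⟩
    · simp only [Option.map_eq_some_iff] at h
      obtain ⟨j', hj', rfl⟩ := h
      obtain ⟨h1, h2⟩ := ih j' hj'
      refine ⟨(pvP_succ_iff c rest j').mpr h1, ?_⟩
      intro i hi
      cases i with
      | zero => rw [pvP_zero_iff]; exact hc
      | succ i => rw [pvP_succ_iff]; exact h2 i (by omega)

theorem pvP_first_unique (l : List Char) (j k : Nat)
    (hj : pvP l j) (hjm : ∀ i, i < j → ¬ pvP l i)
    (hk : pvP l k) (hkm : ∀ i, i < k → ¬ pvP l i) : j = k := by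
  rcases lt_trichotomy j k with h | h | h
  · exact absurd hj (hkm j h)
  · exact h
  · exact absurd hk (hjm k h)

-- no occurrence as infix ⇒ no occurrence at any position
theorem pv_not_infix (sub l : List Char) (h : ¬ sub <:+: l) : ∀ j, ¬ sub <+: l.drop j := by
  intro j hp
  exact h ((PySem.Chars.isIn_iff_infix sub l).mp
    ((PySem.Chars.exists_prefix_drop_iff_isIn sub l).mp ⟨j, hp⟩))

-- main equivalence
theorem pv_main (text : String) :
    split_first_sentence_py text = split_first_sentence_py_alt text := by
  have e1 : (". " : String).toList = ['.', ' '] := rfl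
  have e2 : (".\n" : String).toList = ['.', '\n'] := rfl
  unfold split_first_sentence_py split_first_sentence_py_alt
  set l := text.toList with hl
  set i1 := PySem.Chars.find l ['.', ' '] with hi1
  set i2 := PySem.Chars.find l ['.', '\n'] with hi2
  have hne1 : -1 ≤ i1 := PySem.Chars.neg_one_le_find l ['.', ' ']
  have hne2 : -1 ≤ i2 := PySem.Chars.neg_one_le_find l ['.', '\n']
  have hfold : List.foldl (fun sentence_idx candidate =>
      let idx := PySem.Str.find text candidate
      if (idx ≠ -1 ∧ idx < sentence_idx) ∨ sentence_idx = -1 then idx else sentence_idx)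
      (-1) [". ", ".\n"]
      = if (i2 ≠ -1 ∧ i2 < i1) ∨ i1 = -1 then i2 else i1 := by
    simp only [List.foldl_cons, List.foldl_nil, PySem.Str.find_eq, e1, e2, ← hl, ← hi1, ← hi2,
      or_true, if_true]
  simp only [hfold]
  by_cases hR : ∃ j, pvRegexDot l = some j
  · obtain ⟨j, hj⟩ := hR
    obtain ⟨hPj, hPmin⟩ := pvRegexDot_some l j hj
    have hmin : (if (i2 ≠ -1 ∧ i2 < i1) ∨ i1 = -1 then i2 else i1) = (j : Int) := by
      by_cases h1 : i1 = -1 <;> by_cases h2 : i2 = -1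
      · exfalso
        have n1 := pv_not_infix ['.', ' '] l ((PySem.Chars.find_eq_neg_one_iff l _).mp (hi1 ▸ h1))
        have n2 := pv_not_infix ['.', '\n'] l ((PySem.Chars.find_eq_neg_one_iff l _).mp (hi2 ▸ h2))
        rcases hPj with hp | hp
        · exact n1 j hp
        · exact n2 j hp
      · have h2' : (0:Int) ≤ i2 := by omega
        obtain ⟨hp2, hm2⟩ := PySem.Chars.find_spec (hi2 ▸ h2')
        have n1 := pv_not_infix ['.', ' '] l ((PySem.Chars.find_eq_neg_one_iff l _).mp (hi1 ▸ h1))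
        have hjq : j = i2.toNat := pvP_first_unique l j i2.toNat hPj hPmin
          (Or.inr hp2) (fun i hi hP => by
            rcases hP with hp | hp
            · exact n1 i hp
            · exact hm2 i hi hp)
        rw [if_pos (Or.inr h1)]
        omega
      · have h1' : (0:Int) ≤ i1 := by omega
        obtain ⟨hp1, hm1⟩ := PySem.Chars.find_spec (hi1 ▸ h1')
        have n2 := pv_not_infix ['.', '\n'] l ((PySem.Chars.find_eq_neg_one_iff l _).mp (hi2 ▸ h2))
        have hjq : j = i1.toNat := pvP_first_unique l j i1.toNat hPj hPmin
          (Or.inl hp1) (fun i hi hP => by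
            rcases hP with hp | hp
            · exact hm1 i hi hp
            · exact n2 i hp)
        rw [if_neg (by simp [h1, h2])]
        omega
      · have h1' : (0:Int) ≤ i1 := by omega
        have h2' : (0:Int) ≤ i2 := by omega
        obtain ⟨hp1, hm1⟩ := PySem.Chars.find_spec (hi1 ▸ h1')
        obtain ⟨hp2, hm2⟩ := PySem.Chars.find_spec (hi2 ▸ h2')
        by_cases hlt : i2 < i1
        · have hjq : j = i2.toNat := pvP_first_unique l j i2.toNat hPj hPmin
            (Or.inr hp2) (fun i hi hP => by
              rcases hP with hp | hp
              · exact hm1 i (by omega) hp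
              · exact hm2 i hi hp)
          rw [if_pos (Or.inl ⟨h2, hlt⟩)]
          omega
        · have hjq : j = i1.toNat := pvP_first_unique l j i1.toNat hPj hPmin
            (Or.inl hp1) (fun i hi hP => by
              rcases hP with hp | hp
              · exact hm1 i hi hp
              · exact hm2 i (by omega) hp)
          rw [if_neg (by simp [h1, h2]; omega)]
          omega
    rw [hmin, hj]
    rw [if_neg (by omega)]
    have hcast : (j : Int) + 1 = ((j + 1 : Nat) : Int) := by push_cast; ring
    rw [hcast, PySem.List.slice_to_natCast, PySem.List.slice_from_natCast]
  · have hnone : pvRegexDot l = none := by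
      cases h : pvRegexDot l with
      | none => rfl
      | some j => exact absurd ⟨j, h⟩ hR
    have hnoP := pvRegexDot_none l hnone
    have h1 : i1 = -1 := by
      rw [hi1, PySem.Chars.find_eq_neg_one_iff]
      intro hinf
      obtain ⟨jj, hp⟩ := (PySem.Chars.exists_prefix_drop_iff_isIn ['.', ' '] l).mpr
        ((PySem.Chars.isIn_iff_infix _ _).mpr hinf)
      exact hnoP jj (Or.inl hp)
    have h2 : i2 = -1 := by
      rw [hi2, PySem.Chars.find_eq_neg_one_iff]
      intro hinf
      obtain ⟨jj, hp⟩ := (PySem.Chars.exists_prefix_drop_iff_isIn ['.', '\n'] l).mpr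
        ((PySem.Chars.isIn_iff_infix _ _).mpr hinf)
      exact hnoP jj (Or.inr hp)
    rw [hnone]
    simp [h1, h2]

-- ===== VERDICT (by name: the statement is the Claim_ definition above) =====
theorem split_first_sentence_py_spec : Claim_equal_split_first_sentence_py := by
  intro text _
  unfold Spec_split_first_sentence_py
  exact pv_main text
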